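-- pv_equiv track=rewrite | github.com/matthewnbrown/roc-cluster | api/job_manager.py | _summarize_recruit_results
-- ===== SOURCE A (Python) =====
-- from typing import List, Dict, Any, Optional
--
-- def _summarize_recruit_results(successful_results: List[Dict]) -> Dict[str, Any]:
--     """Summarize recruit action results"""
--     summary = {
--         "recruit_not_needed": 0,
--         "recruitments_successful": 0,
--         "recruitments_failed": 0,
--         "total_cost": 0,
--         "total_retries": 0
--     }
--
--     for result in successful_results:
--         result_data = result.get("result", {})
--         if isinstance(result_data, dict):
--             summary["total_retries"] += result_data.get("retries", 0)
--             if result_data.get("success"):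
--                 summary["recruitments_successful"] += 1
--                 summary["recruit_not_needed"] += result_data.get("recruit_not_needed", 0)
--                 summary["total_cost"] += result_data.get("cost", 0)
--             else:
--                 summary["recruitments_failed"] += 1
--
--     return summary
-- ===== SOURCE B (Python) =====
-- from typing import List, Dict, Any
--
-- def _summarize_recruit_results(successful_results: List[Dict]) -> Dict[str, Any]:
--     """Summarize recruit action results by divide-and-conquer merge of sub-summaries."""
--     def combine(x, y):
--         return tuple(a + b for a, b in zip(x, y))
--
--     def summarize(items):
--         n = len(items)
--         if n == 0:
--             return (0, 0, 0, 0, 0)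
--         if n == 1:
--             rd = items[0].get("result", {})
--             if not isinstance(rd, dict):
--                 return (0, 0, 0, 0, 0)
--             retries = rd.get("retries", 0)
--             if rd.get("success"):
--                 return (rd.get("recruit_not_needed", 0), 1, 0,
--                         rd.get("cost", 0), retries)
--             return (0, 0, 1, 0, retries)
--         mid = n // 2
--         return combine(summarize(items[:mid]), summarize(items[mid:]))
--
--     rnn, ok, fail, cost, retries = summarize(list(successful_results))
--     return {
--         "recruit_not_needed": rnn,
--         "recruitments_successful": ok,
--         "recruitments_failed": fail,
--         "total_cost": cost,
--         "total_retries": retries,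
--     }
-- ===== Notes on version B (the rewrite author's own statement) =====
-- stated objective: alternative
-- what changed: Replaces A's single stateful left-to-right loop that mutates a five-key summary dict with a divide-and-conquer aggregation: the list is recursively split in half, each half is summarized into a 5-tuple, and the tuples are merged componentwise; the dict is assembled once at the end (correct because the per-element summaries form a commutative monoid under componentwise addition).
import Mathlib
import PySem

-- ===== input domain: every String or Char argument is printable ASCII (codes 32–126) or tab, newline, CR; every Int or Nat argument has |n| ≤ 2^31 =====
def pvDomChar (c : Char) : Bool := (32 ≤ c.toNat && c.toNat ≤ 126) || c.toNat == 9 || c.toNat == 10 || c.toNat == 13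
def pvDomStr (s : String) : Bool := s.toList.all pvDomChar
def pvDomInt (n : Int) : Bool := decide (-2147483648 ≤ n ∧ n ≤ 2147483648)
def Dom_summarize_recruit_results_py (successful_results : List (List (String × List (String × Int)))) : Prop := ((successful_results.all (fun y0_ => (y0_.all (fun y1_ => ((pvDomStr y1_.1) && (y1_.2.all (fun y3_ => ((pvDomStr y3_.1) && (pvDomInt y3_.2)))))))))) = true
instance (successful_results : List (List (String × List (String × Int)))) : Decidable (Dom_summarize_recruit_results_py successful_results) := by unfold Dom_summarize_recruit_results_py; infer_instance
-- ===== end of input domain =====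

-- B replaces A's single stateful loop over a mutated five-key summary dict by a
-- divide-and-conquer merge of componentwise-added 5-tuple sub-summaries (objective: alternative).

-- ===== PORT A =====
-- summary is the mutated dict; each `summary[k] += v` is insert k (getD k 0 + v).
-- Under the type convention every "result" value is a dict, so Python's
-- `isinstance(result_data, dict)` test is always True and its branch is kept unconditionally.
def summarize_recruit_results_py (successful_results : List (List (String × List (String × Int)))) : List (String × Int) :=
  (successful_results.foldl (fun summary result =>
    let result_data : PySem.Dict String (List (String × Int)) := PySem.Dict.mk result
    let rd : PySem.Dict String Int := PySem.Dict.mk (result_data.getD "result" [])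
    let summary := summary.insert "total_retries" (summary.getD "total_retries" 0 + rd.getD "retries" 0)
    if rd.getD "success" 0 ≠ 0 then
      let summary := summary.insert "recruitments_successful" (summary.getD "recruitments_successful" 0 + 1)
      let summary := summary.insert "recruit_not_needed" (summary.getD "recruit_not_needed" 0 + rd.getD "recruit_not_needed" 0)
      summary.insert "total_cost" (summary.getD "total_cost" 0 + rd.getD "cost" 0)
    else
      summary.insert "recruitments_failed" (summary.getD "recruitments_failed" 0 + 1))
    (PySem.Dict.mk [("recruit_not_needed", 0), ("recruitments_successful", 0),
                    ("recruitments_failed", 0), ("total_cost", 0), ("total_retries", 0)])).items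

-- ===== PORT B =====
-- B-side helpers (transcription of Source B's `combine` and of `summarize`'s base case).
def pvCombine (x y : Int × Int × Int × Int × Int) : Int × Int × Int × Int × Int :=
  (x.1 + y.1, x.2.1 + y.2.1, x.2.2.1 + y.2.2.1, x.2.2.2.1 + y.2.2.2.1, x.2.2.2.2 + y.2.2.2.2)

-- one-element base case of Source B's `summarize`; under the type convention the
-- "result" value is always a dict, so the isinstance branch is kept unconditionally.
def pvSingle (r : List (String × List (String × Int))) : Int × Int × Int × Int × Int :=
  let rd : PySem.Dict String Int := PySem.Dict.mk ((PySem.Dict.mk r).getD "result" [])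
  let retries := rd.getD "retries" 0
  if rd.getD "success" 0 ≠ 0 then
    (rd.getD "recruit_not_needed" 0, 1, 0, rd.getD "cost" 0, retries)
  else
    (0, 0, 1, 0, retries)

-- Source B's recursive `summarize`: split at n // 2 and merge the halves.
def pvGo : List (List (String × List (String × Int))) → Int × Int × Int × Int × Int
  | [] => (0, 0, 0, 0, 0)
  | [x] => pvSingle x
  | x :: y :: rest =>
      let l := x :: y :: rest
      let mid := l.length / 2
      pvCombine (pvGo (l.take mid)) (pvGo (l.drop mid))
termination_by l => l.length
decreasing_by
  all_goals simp [List.length_take, List.length_drop]; omega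

def summarize_recruit_results_py_alt (successful_results : List (List (String × List (String × Int)))) : List (String × Int) :=
  let t := pvGo successful_results
  [("recruit_not_needed", t.1), ("recruitments_successful", t.2.1),
   ("recruitments_failed", t.2.2.1), ("total_cost", t.2.2.2.1),
   ("total_retries", t.2.2.2.2)]

-- ===== PRECONDITION & SPEC =====
def Spec_summarize_recruit_results_py (successful_results : List (List (String × List (String × Int)))) (out : List (String × Int)) : Prop := out = summarize_recruit_results_py_alt successful_results
instance (successful_results : List (List (String × List (String × Int)))) (out : List (String × Int)) : Decidable (Spec_summarize_recruit_results_py successful_results out) := by unfold Spec_summarize_recruit_results_py; infer_instance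

-- ===== CLAIM (what is proved, stated in full; the proofs are below) =====
def Claim_equal_summarize_recruit_results_py : Prop := ∀ (successful_results : List (List (String × List (String × Int)))), Dom_summarize_recruit_results_py successful_results → Spec_summarize_recruit_results_py successful_results (summarize_recruit_results_py successful_results)

-- ===== LEMMAS AND PROOFS =====

-- A's loop body, named for the proofs (definitionally equal to the lambda in port A).
def pvStepA (summary : PySem.Dict String Int) (result : List (String × List (String × Int))) : PySem.Dict String Int :=
  let result_data : PySem.Dict String (List (String × Int)) := PySem.Dict.mk result
  let rd : PySem.Dict String Int := PySem.Dict.mk (result_data.getD "result" [])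
  let summary := summary.insert "total_retries" (summary.getD "total_retries" 0 + rd.getD "retries" 0)
  if rd.getD "success" 0 ≠ 0 then
    let summary := summary.insert "recruitments_successful" (summary.getD "recruitments_successful" 0 + 1)
    let summary := summary.insert "recruit_not_needed" (summary.getD "recruit_not_needed" 0 + rd.getD "recruit_not_needed" 0)
    summary.insert "total_cost" (summary.getD "total_cost" 0 + rd.getD "cost" 0)
  else
    summary.insert "recruitments_failed" (summary.getD "recruitments_failed" 0 + 1)

-- The inner result dict of one element.
def pvRd (result : List (String × List (String × Int))) : PySem.Dict String Int :=
  PySem.Dict.mk ((PySem.Dict.mk result).getD "result" [])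

-- A summary dict with the five fixed keys and arbitrary values.
def pvInit (a b c e f : Int) : PySem.Dict String Int :=
  PySem.Dict.mk [("recruit_not_needed", a), ("recruitments_successful", b),
                 ("recruitments_failed", c), ("total_cost", e), ("total_retries", f)]

-- The linear reference summary of a list, as a 5-tuple.
def pvT (l : List (List (String × List (String × Int)))) : Int × Int × Int × Int × Int :=
  let valid := l.map (fun r => (PySem.Dict.mk r).getD "result" [])
  let successes := valid.filter (fun d => (PySem.Dict.mk d).getD "success" 0 ≠ 0)
  ((successes.map (fun d => (PySem.Dict.mk d).getD "recruit_not_needed" 0)).sum,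
   (successes.length : Int),
   (valid.length : Int) - (successes.length : Int),
   (successes.map (fun d => (PySem.Dict.mk d).getD "cost" 0)).sum,
   (valid.map (fun d => (PySem.Dict.mk d).getD "retries" 0)).sum)

lemma pvStepA_pos (x : List (String × List (String × Int))) (a b c e f : Int)
    (h : (pvRd x).getD "success" 0 ≠ 0) :
    pvStepA (pvInit a b c e f) x =
      pvInit (a + (pvRd x).getD "recruit_not_needed" 0) (b + 1) c
             (e + (pvRd x).getD "cost" 0) (f + (pvRd x).getD "retries" 0) := by
  rw [pvStepA]
  simp only [pvRd] at h ⊢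
  rw [if_pos h]
  apply PySem.Dict.ext
  simp [pvInit, PySem.Dict.insert, PySem.Dict.getD, PySem.Dict.get?, PySem.Dict.contains]

lemma pvStepA_neg (x : List (String × List (String × Int))) (a b c e f : Int)
    (h : ¬ (pvRd x).getD "success" 0 ≠ 0) :
    pvStepA (pvInit a b c e f) x =
      pvInit a b (c + 1) e (f + (pvRd x).getD "retries" 0) := by
  rw [pvStepA]
  simp only [pvRd] at h ⊢
  rw [if_neg h]
  apply PySem.Dict.ext
  simp [pvInit, PySem.Dict.insert, PySem.Dict.getD, PySem.Dict.get?, PySem.Dict.contains]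

-- Characterisation of A's whole loop from any starting values at the five keys.
lemma pvFoldChar (l : List (List (String × List (String × Int)))) :
    ∀ (a b c e f : Int),
    (l.foldl pvStepA (pvInit a b c e f)).items =
      [("recruit_not_needed", a + (pvT l).1),
       ("recruitments_successful", b + (pvT l).2.1),
       ("recruitments_failed", c + (pvT l).2.2.1),
       ("total_cost", e + (pvT l).2.2.2.1),
       ("total_retries", f + (pvT l).2.2.2.2)] := by
  induction l with
  | nil => intro a b c e f; simp [pvInit, pvT]
  | cons x xs ih =>
    intro a b c e f
    by_cases h : (pvRd x).getD "success" 0 ≠ 0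
    · rw [List.foldl_cons, pvStepA_pos x a b c e f h, ih]
      simp only [pvT, List.map_cons, List.filter_cons, pvRd] at h ⊢
      rw [if_pos (by simpa using h)]
      simp only [List.map_cons, List.sum_cons, List.length_cons, List.cons.injEq, Prod.mk.injEq]
      and_intros <;> (try trivial) <;> (push_cast; ring)
    · rw [List.foldl_cons, pvStepA_neg x a b c e f h, ih]
      simp only [pvT, List.map_cons, List.filter_cons, pvRd] at h ⊢
      rw [if_neg (by simpa using h)]
      simp only [List.sum_cons, List.length_cons, List.cons.injEq, Prod.mk.injEq]
      and_intros <;> (try trivial) <;> (push_cast; ring)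

-- pvT is additive under append (the summaries form a monoid under pvCombine).
lemma pvT_append (l₁ l₂ : List (List (String × List (String × Int)))) :
    pvT (l₁ ++ l₂) = pvCombine (pvT l₁) (pvT l₂) := by
  simp only [pvT, pvCombine, List.map_append, List.filter_append, List.sum_append,
    List.length_append, Prod.mk.injEq]
  and_intros <;> push_cast <;> try ring

lemma pvT_single (x : List (String × List (String × Int))) : pvT [x] = pvSingle x := by
  simp only [pvT, pvSingle, List.map_cons, List.map_nil]
  by_cases h : (PySem.Dict.mk ((PySem.Dict.mk x).getD "result" [])).getD "success" 0 ≠ 0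
  · rw [if_pos h]; simp [List.filter, h]
  · rw [if_neg h]; simp [List.filter, h]

-- B's divide-and-conquer recursion computes the linear reference summary.
lemma pvGo_eq : ∀ (n : ℕ) (l : List (List (String × List (String × Int)))),
    l.length ≤ n → pvGo l = pvT l := by
  intro n
  induction n with
  | zero =>
    intro l hl
    have : l = [] := List.eq_nil_of_length_eq_zero (Nat.le_zero.mp hl)
    subst this
    simp [pvGo, pvT]
  | succ n ih =>
    intro l hl
    match l with
    | [] => simp [pvGo, pvT]
    | [x] => rw [pvGo, pvT_single]
    | x :: y :: rest =>
      rw [pvGo]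
      have hlen : (x :: y :: rest).length = rest.length + 2 := by simp
      have h1 : ((x :: y :: rest).take ((x :: y :: rest).length / 2)).length ≤ n := by
        simp only [List.length_take, hlen] at *
        omega
      have h2 : ((x :: y :: rest).drop ((x :: y :: rest).length / 2)).length ≤ n := by
        simp only [List.length_drop, hlen] at *
        omega
      rw [ih _ h1, ih _ h2, ← pvT_append, List.take_append_drop]

-- ===== VERDICT (by name: the statement is the Claim_ definition above) =====
theorem summarize_recruit_results_py_spec : Claim_equal_summarize_recruit_results_py := by
  intro sr _
  unfold Spec_summarize_recruit_results_py
  have h1 : summarize_recruit_results_py sr = (sr.foldl pvStepA (pvInit 0 0 0 0 0)).items := rfl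
  rw [h1, pvFoldChar]
  simp [summarize_recruit_results_py_alt, pvGo_eq sr.length sr le_rfl]
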